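-- pv_equiv track=rewrite | github.com/taem0001/2048 | src/logic.py | shuffleDown
-- ===== SOURCE A (Python) =====
-- def shuffleDown(matrix):
--     for i in range(4):
--         col = inverseList(getCol(matrix, i))
--         k = 3
--         for j in range(4):
--             matrix[j][i] = col[k]
--             k -= 1
--     return matrix
--
-- def getCol(matrix, i):
--     col = []
--     for j in range(4):
--         if matrix[j][i] != 0:
--             col.append(matrix[j][i])
--     for _ in range(4 - len(col)):
--         col.append(0)
--     return col
--
-- def inverseList(col):
--     col = [item for item in col if item != 0]
--
--     p1 = 0
--     p2 = len(col) - 1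
--
--     while p1 < p2:
--         temp = col[p1]
--         col[p1] = col[p2]
--         col[p2] = temp
--
--         p1 += 1
--         p2 -= 1
--
--     while len(col) < 4:
--         col.append(0)
--
--     return col
-- ===== SOURCE B (Python) =====
-- def shuffleDown(matrix):
--     for i in range(4):
--         write = 3
--         for j in range(3, -1, -1):
--             v = matrix[j][i]
--             if v != 0:
--                 matrix[j][i] = 0
--                 matrix[write][i] = v
--                 write -= 1
--     return matrix
-- ===== Notes on version B (the rewrite author's own statement) =====
-- stated objective: simpler
-- what changed: Per column, B replaces A's three-phase pipeline (collect nonzeros into a temp list, reverse it in place with a swap loop and pad to 4, then copy it back top-down) by a single bottom-up scan with a write cursor that moves each nonzero cell down in place, with no auxiliary list and no helper functions.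
import Mathlib
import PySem

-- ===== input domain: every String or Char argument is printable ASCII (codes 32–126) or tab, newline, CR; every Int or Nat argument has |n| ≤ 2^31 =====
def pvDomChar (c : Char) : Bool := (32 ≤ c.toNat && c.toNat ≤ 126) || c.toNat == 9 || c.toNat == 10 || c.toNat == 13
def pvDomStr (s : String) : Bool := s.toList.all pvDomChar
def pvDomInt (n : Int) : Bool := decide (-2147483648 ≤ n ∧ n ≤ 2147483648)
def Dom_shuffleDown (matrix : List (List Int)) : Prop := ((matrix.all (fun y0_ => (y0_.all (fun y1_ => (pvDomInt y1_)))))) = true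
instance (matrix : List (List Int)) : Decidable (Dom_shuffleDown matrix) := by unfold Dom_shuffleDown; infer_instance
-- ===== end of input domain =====

-- B replaces A's build-column / filter-reverse-pad / copy-back pipeline by an in-place
-- two-pointer compaction per column (objective: simpler; equivalence is about the return
-- value — both Pythons also mutate `matrix` in place, and B performs the same mutation).

-- ===== PORT A =====
-- matrix[j][i] read / write; missing cells read as 0 and writes out of range are
-- no-ops (Python raises there; such inputs are excluded by Pre_shuffleDown).
def pvGetCell (m : List (List Int)) (j i : Nat) : Int := (m.getD j []).getD i 0

def pvSetCell (m : List (List Int)) (j i : Nat) (v : Int) : List (List Int) :=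
  m.set j ((m.getD j []).set i v)

def getCol (matrix : List (List Int)) (i : Nat) : List Int :=
  let col := (List.range 4).foldl
    (fun col j => if pvGetCell matrix j i ≠ 0 then col ++ [pvGetCell matrix j i] else col) []
  (List.range (4 - col.length)).foldl (fun col _ => col ++ [0]) col

-- the `while p1 < p2` swap loop of inverseList (Python's p2 = len-1 may be -1 on an
-- empty list; the loop then does not run, matching Nat subtraction's 0 here)
def pvSwapLoop (col : List Int) (p1 p2 : Nat) : List Int :=
  if p1 < p2 then
    let temp := col.getD p1 0
    pvSwapLoop ((col.set p1 (col.getD p2 0)).set p2 temp) (p1 + 1) (p2 - 1)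
  else col
termination_by p2 - p1
decreasing_by omega

-- the `while len(col) < 4: col.append(0)` loop of inverseList
def pvPadLoop (col : List Int) : List Int :=
  if col.length < 4 then pvPadLoop (col ++ [0]) else col
termination_by 4 - col.length
decreasing_by simp; omega

def inverseList (col : List Int) : List Int :=
  let col := col.filter (fun item => item ≠ 0)
  pvPadLoop (pvSwapLoop col 0 (col.length - 1))

-- body of A's outer `for i in range(4)` loop; state of the inner loop is (matrix, k)
def pvAStep (m : List (List Int)) (i : Nat) : List (List Int) :=
  let col := inverseList (getCol m i)
  ((List.range 4).foldl
      (fun (s : List (List Int) × Nat) j => (pvSetCell s.1 j i (col.getD s.2 0), s.2 - 1))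
      (m, 3)).1

def shuffleDown (matrix : List (List Int)) : List (List Int) :=
  (List.range 4).foldl pvAStep matrix

-- ===== PORT B =====
-- body of B's outer loop: scan j = 3,2,1,0 with a write cursor; state is (matrix, write)
def pvBStep (m : List (List Int)) (i : Nat) : List (List Int) :=
  (((List.range 4).reverse).foldl
      (fun (s : List (List Int) × Nat) j =>
        let v := pvGetCell s.1 j i
        if v ≠ 0 then (pvSetCell (pvSetCell s.1 j i 0) s.2 i v, s.2 - 1) else s)
      (m, 3)).1

def shuffleDown_alt (matrix : List (List Int)) : List (List Int) :=
  (List.range 4).foldl pvBStep matrix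

-- ===== PRECONDITION & SPEC =====
-- exactly the inputs on which Python A returns (otherwise matrix[j][i] with j,i < 4
-- raises IndexError): at least 4 rows, each of the first 4 rows of length ≥ 4
def Pre_shuffleDown (matrix : List (List Int)) : Prop :=
  4 ≤ matrix.length ∧ ∀ row ∈ matrix.take 4, 4 ≤ row.length
instance (matrix : List (List Int)) : Decidable (Pre_shuffleDown matrix) := by
  unfold Pre_shuffleDown; infer_instance

def pvWitness_shuffleDown : List (List Int) :=
  [[2, 0, 0, 2], [0, 4, 0, 0], [2, 0, 8, 0], [0, 0, 8, 2]]

def Spec_shuffleDown (matrix : List (List Int)) (out : List (List Int)) : Prop := out = shuffleDown_alt matrix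
instance (matrix : List (List Int)) (out : List (List Int)) : Decidable (Spec_shuffleDown matrix out) := by unfold Spec_shuffleDown; infer_instance

-- ===== CLAIM (what is proved, stated in full; the proofs are below) =====
def Claim_equal_shuffleDown : Prop := ∀ (matrix : List (List Int)), Dom_shuffleDown matrix → Pre_shuffleDown matrix → Spec_shuffleDown matrix (shuffleDown matrix)

-- ===== LEMMAS AND PROOFS =====

theorem pvSetCell_setCell_same (m : List (List Int)) (j i : Nat) (v w : Int) :
    pvSetCell (pvSetCell m j i v) j i w = pvSetCell m j i w := by
  unfold pvSetCell
  by_cases h : j < m.length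
  · simp [List.getD_eq_getElem?_getD, List.getElem?_set_self h, List.set_set]
  · simp [List.set_eq_of_length_le (by omega : m.length ≤ j)]

theorem pvSetCell_comm (m : List (List Int)) (i j j' : Nat) (v w : Int) (h : j < j') :
    pvSetCell (pvSetCell m j' i v) j i w = pvSetCell (pvSetCell m j i w) j' i v := by
  unfold pvSetCell
  have hne : j' ≠ j := by omega
  simp [List.getD_eq_getElem?_getD, List.getElem?_set_ne hne, List.getElem?_set_ne hne.symm,
    List.set_comm _ _ hne]

theorem pvGetCell_setCell_ne (m : List (List Int)) (i i' j j' : Nat) (v : Int) (h : j ≠ j') :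
    pvGetCell (pvSetCell m j i v) j' i' = pvGetCell m j' i' := by
  unfold pvGetCell pvSetCell
  simp [List.getD_eq_getElem?_getD, List.getElem?_set_ne h]

theorem pvSetGetD_self {α : Type} [Inhabited α] (l : List α) (i : Nat) (d : α)
    (hi : i < l.length) : l.set i (l.getD i d) = l := by
  rw [List.getD_eq_getElem?_getD, List.getElem?_eq_getElem hi]
  simp

theorem pvSetCell_self (m : List (List Int)) (j i : Nat) (v : Int)
    (h : pvGetCell m j i = v) : pvSetCell m j i v = m := by
  unfold pvGetCell at h
  unfold pvSetCell
  by_cases hj : j < m.length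
  · rw [← h]
    by_cases hi : i < (m.getD j []).length
    · rw [pvSetGetD_self _ _ _ hi]
      exact pvSetGetD_self m j [] hj
    · rw [List.set_eq_of_length_le (by omega : (m.getD j []).length ≤ i)]
      exact pvSetGetD_self m j [] hj
  · exact List.set_eq_of_length_le (by omega : m.length ≤ j)

-- the two per-column bodies agree on every matrix (also degenerate ones: a missing
-- cell reads as 0 on both sides and writes to it are no-ops on both sides)
theorem colStep_eq (m : List (List Int)) (i : Nat) : pvAStep m i = pvBStep m i := by
  by_cases h0 : pvGetCell m 0 i = 0 <;>
    by_cases h1 : pvGetCell m 1 i = 0 <;>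
      by_cases h2 : pvGetCell m 2 i = 0 <;>
        by_cases h3 : pvGetCell m 3 i = 0 <;>
          simp_all [pvAStep, pvBStep, getCol, inverseList, pvSwapLoop, pvPadLoop,
            List.range_succ, List.getD, pvSetCell_setCell_same, pvSetCell_comm,
            pvGetCell_setCell_ne, pvSetCell_self]

-- ===== VERDICT (by name: the statement is the Claim_ definition above) =====
theorem shuffleDown_spec : Claim_equal_shuffleDown := by
  intro matrix _ _
  unfold Spec_shuffleDown shuffleDown shuffleDown_alt
  rw [funext fun m => funext fun i => colStep_eq m i]
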